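-- pv_equiv track=rewrite | github.com/briggsvergil/HyForge | resources/Yggdrasil.py | templateClassDef
-- ===== SOURCE A (Python) =====
-- def templateClassDef(cT, cN, aI):
--     b = False
--     e = ''
--     i = []
--     if len(aI) > 0:
--         for d in aI:
--             if d['type'] == 'class' and not b:
--                 b = True
--                 e = d['name']
--             else:
--                 i.append(d['name'])
--     iS = " implements Serializable, DrosteDeflater" + (" {\n\n\n" if len(i)==0 else (", ".join(i) + " {\n\n\n"))
--     e = '' if len(e)==0 else ' extends ' + e
--     return f"public {cT} {cN}{e}{iS}"
-- ===== SOURCE B (Python) =====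
-- def templateClassDef(cT, cN, aI):
--     j = next((k for k, d in enumerate(aI) if d['type'] == 'class'), None)
--     e = '' if j is None else aI[j]['name']
--     i = [d['name'] for k, d in enumerate(aI) if k != j]
--     iS = " implements Serializable, DrosteDeflater" + (" {\n\n\n" if len(i)==0 else (", ".join(i) + " {\n\n\n"))
--     e = '' if len(e)==0 else ' extends ' + e
--     return f"public {cT} {cN}{e}{iS}"
-- ===== Notes on version B (the rewrite author's own statement) =====
-- stated objective: simpler
-- what changed: A's single stateful pass with a boolean 'already found the extends class' flag and a mutated accumulator is replaced by a find of the first class index (next over enumerate) plus an index-filtered comprehension for the implements names; the final formatting is unchanged.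
import Mathlib
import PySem

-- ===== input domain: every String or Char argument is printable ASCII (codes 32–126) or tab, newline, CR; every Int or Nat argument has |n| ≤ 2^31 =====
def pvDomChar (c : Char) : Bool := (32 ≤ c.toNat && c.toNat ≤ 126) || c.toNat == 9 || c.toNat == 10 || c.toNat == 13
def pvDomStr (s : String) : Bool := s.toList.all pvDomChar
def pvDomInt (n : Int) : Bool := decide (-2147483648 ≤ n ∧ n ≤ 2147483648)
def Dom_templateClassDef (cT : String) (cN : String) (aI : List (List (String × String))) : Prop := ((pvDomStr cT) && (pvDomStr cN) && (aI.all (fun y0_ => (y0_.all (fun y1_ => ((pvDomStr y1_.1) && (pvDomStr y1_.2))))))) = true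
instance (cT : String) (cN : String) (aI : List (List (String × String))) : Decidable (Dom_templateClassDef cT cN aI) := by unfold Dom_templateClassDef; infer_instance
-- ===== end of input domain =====

-- B replaces A's stateful flag-driven loop by an index-find plus a filtered comprehension
-- (simpler decomposition, same cost); return value only, no mutation involved.

-- ===== PORT A =====
-- d['type'] / d['name']: KeyError (get? = none) is excluded by Pre_, so getD "" is exact there.
def pvTy (d : List (String × String)) : String := (PySem.Dict.get? (PySem.Dict.mk d) "type").getD ""
def pvNm (d : List (String × String)) : String := (PySem.Dict.get? (PySem.Dict.mk d) "name").getD ""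

-- the 'for d in aI' loop of A, state (b, e, i)
def pvLoopA : List (List (String × String)) → Bool → String → List String → Bool × String × List String
  | [], b, e, i => (b, e, i)
  | d :: t, b, e, i =>
    if pvTy d == "class" && !b then pvLoopA t true (pvNm d) i
    else pvLoopA t b e (i ++ [pvNm d])

def templateClassDef (cT : String) (cN : String) (aI : List (List (String × String))) : String :=
  let st := if aI.length > 0 then pvLoopA aI false "" [] else (false, "", [])
  let e := st.2.1
  let i := st.2.2
  let iS := " implements Serializable, DrosteDeflater" ++
    (if i.length == 0 then " {\n\n\n" else (PySem.Str.join ", " i ++ " {\n\n\n"))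
  let e2 := if PySem.Str.len e == 0 then "" else " extends " ++ e
  "public " ++ cT ++ " " ++ cN ++ e2 ++ iS

-- ===== PORT B =====
def templateClassDef_alt (cT : String) (cN : String) (aI : List (List (String × String))) : String :=
  -- j = next((k for k, d in enumerate(aI) if d['type'] == 'class'), None)
  let j : Option Int := ((PySem.List.enumerate aI 0).find? (fun p => pvTy p.2 == "class")).map (·.1)
  -- e = '' if j is None else aI[j]['name']
  let e := match j with
    | none => ""
    | some k => pvNm ((PySem.List.pyGet? aI k).getD [])
  -- i = [d['name'] for k, d in enumerate(aI) if k != j]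
  let i := ((PySem.List.enumerate aI 0).filter (fun p => !((some p.1 : Option Int) == j))).map (fun p => pvNm p.2)
  let iS := " implements Serializable, DrosteDeflater" ++
    (if i.length == 0 then " {\n\n\n" else (PySem.Str.join ", " i ++ " {\n\n\n"))
  let e2 := if PySem.Str.len e == 0 then "" else " extends " ++ e
  "public " ++ cT ++ " " ++ cN ++ e2 ++ iS

-- ===== PRECONDITION & SPEC =====
-- Pre_ excludes only inputs where Python A raises KeyError: some dict lacks the 'type' or 'name' key.
def Pre_templateClassDef (cT : String) (cN : String) (aI : List (List (String × String))) : Prop :=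
  ∀ d ∈ aI, ((PySem.Dict.get? (PySem.Dict.mk d) "type").isSome = true ∧ (PySem.Dict.get? (PySem.Dict.mk d) "name").isSome = true)
instance (cT : String) (cN : String) (aI : List (List (String × String))) : Decidable (Pre_templateClassDef cT cN aI) := by unfold Pre_templateClassDef; infer_instance

def pvWitness_templateClassDef : String × String × (List (List (String × String))) :=
  ("class", "Foo", [[("type", "class"), ("name", "Base")], [("type", "int"), ("name", "x")]])

def Spec_templateClassDef (cT : String) (cN : String) (aI : List (List (String × String))) (out : String) : Prop := out = templateClassDef_alt cT cN aI
instance (cT : String) (cN : String) (aI : List (List (String × String))) (out : String) : Decidable (Spec_templateClassDef cT cN aI out) := by unfold Spec_templateClassDef; infer_instance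

-- ===== CLAIM (what is proved, stated in full; the proofs are below) =====
def Claim_equal_templateClassDef : Prop := ∀ (cT : String) (cN : String) (aI : List (List (String × String))), Dom_templateClassDef cT cN aI → Pre_templateClassDef cT cN aI → Spec_templateClassDef cT cN aI (templateClassDef cT cN aI)

-- ===== LEMMAS AND PROOFS =====

-- common specification of the (extends, implements) pair both loops compute
def pvFind : List (List (String × String)) → Option (Nat × List (String × String))
  | [] => none
  | d :: t => if pvTy d == "class" then some (0, d) else (pvFind t).map (fun q => (q.1 + 1, q.2))

def pvKeep : List (List (String × String)) → Option Nat → List String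
  | [], _ => []
  | d :: t, none => pvNm d :: pvKeep t none
  | _ :: t, some 0 => pvKeep t none
  | d :: t, some (k+1) => pvNm d :: pvKeep t (some k)

theorem pvKeep_none (l : List (List (String × String))) : pvKeep l none = l.map pvNm := by
  induction l with
  | nil => rfl
  | cons d t ih => simp [pvKeep, ih]

-- A's loop with the flag already set only appends every remaining name
theorem pvLoopA_true (l : List (List (String × String))) :
    ∀ e i, pvLoopA l true e i = (true, e, i ++ l.map pvNm) := by
  induction l with
  | nil => intro e i; simp [pvLoopA]
  | cons d t ih => intro e i; simp [pvLoopA, ih]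

-- A's loop computes the pvFind/pvKeep specification
theorem pvLoopA_spec (l : List (List (String × String))) :
    ∀ i, pvLoopA l false "" i =
      ((pvFind l).isSome,
       (match pvFind l with | none => "" | some q => pvNm q.2),
       i ++ pvKeep l ((pvFind l).map (·.1))) := by
  induction l with
  | nil => intro i; simp [pvLoopA, pvFind, pvKeep]
  | cons d t ih =>
    intro i
    by_cases hc : pvTy d == "class"
    · simp [pvLoopA, pvFind, hc, pvLoopA_true, pvKeep, pvKeep_none]
    · rw [show pvLoopA (d :: t) false "" i = pvLoopA t false "" (i ++ [pvNm d]) by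
        simp [pvLoopA, hc]]
      rw [ih]
      rcases h : pvFind t with _ | q <;> simp [pvFind, hc, h, pvKeep]

-- find? over enumerate is pvFind shifted by the start index
theorem pvFind_enum (l : List (List (String × String))) :
    ∀ s : Int, (PySem.List.enumerate l s).find? (fun p => pvTy p.2 == "class")
      = (pvFind l).map (fun q => (s + (q.1 : Int), q.2)) := by
  induction l with
  | nil => intro s; simp [PySem.List.enumerate_nil, pvFind]
  | cons d t ih =>
    intro s
    rw [PySem.List.enumerate_cons]
    by_cases hc : pvTy d == "class"
    · simp [hc, pvFind]
    · rw [List.find?_cons_of_neg (by simpa using hc)]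
      rw [ih (s + 1)]
      rcases h : pvFind t with _ | q
      · simp [pvFind, hc, h]
      · simp only [pvFind, hc, Bool.false_eq_true, if_false, h, Option.map_some]
        congr 1
        simp only [Prod.mk.injEq, and_true]
        push_cast
        ring

-- the found element is the one at the found index
theorem pvFind_get (l : List (List (String × String))) :
    ∀ k d, pvFind l = some (k, d) → l[k]? = some d := by
  induction l with
  | nil => intro k d h; simp [pvFind] at h
  | cons x t ih =>
    intro k d h
    rw [pvFind] at h
    by_cases hc : (pvTy x == "class") = true
    · simp only [hc, if_true, Option.some.injEq, Prod.mk.injEq] at h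
      obtain ⟨hk, hd⟩ := h
      subst hd
      simp [← hk]
    · rw [Bool.not_eq_true] at hc
      simp only [hc, Bool.false_eq_true, if_false] at h
      rcases ho : pvFind t with _ | q
      · rw [ho] at h; simp at h
      · rw [ho] at h
        simp only [Option.map_some, Option.some.injEq, Prod.mk.injEq] at h
        obtain ⟨hk, hd⟩ := h
        subst hd
        rw [← hk]
        simpa using ih q.1 q.2 ho

-- filtering away an index below the start keeps everything
theorem pvFilter_out (l : List (List (String × String))) :
    ∀ (s m : Int), m < s →
      ((PySem.List.enumerate l s).filter (fun p => !((some p.1 : Option Int) == some m))).map (fun p => pvNm p.2)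
        = l.map pvNm := by
  induction l with
  | nil => intro s m _; simp [PySem.List.enumerate_nil]
  | cons d t ih =>
    intro s m hm
    rw [PySem.List.enumerate_cons]
    have hne : ((some s : Option Int) == some m) = false := by
      simp; omega
    simp only [List.filter_cons, hne, Bool.not_false, if_true, List.map_cons]
    rw [ih (s + 1) m (by omega)]

-- filtering with no index at all keeps everything
theorem pvFilter_none (l : List (List (String × String))) :
    ∀ (s : Int),
      ((PySem.List.enumerate l s).filter (fun p => !((some p.1 : Option Int) == (none : Option Int)))).map (fun p => pvNm p.2)
        = l.map pvNm := by
  induction l with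
  | nil => intro s; simp [PySem.List.enumerate_nil]
  | cons d t ih =>
    intro s
    rw [PySem.List.enumerate_cons]
    simp only [List.filter_cons, show ((some s : Option Int) == (none : Option Int)) = false from rfl,
      Bool.not_false, if_true, List.map_cons]
    rw [ih (s + 1)]

-- filtering away index s + k computes pvKeep (some k)
theorem pvFilter_some (l : List (List (String × String))) :
    ∀ (s : Int) (k : Nat),
      ((PySem.List.enumerate l s).filter (fun p => !((some p.1 : Option Int) == some (s + (k : Int))))).map (fun p => pvNm p.2)
        = pvKeep l (some k) := by
  induction l with
  | nil => intro s k; simp [PySem.List.enumerate_nil, pvKeep]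
  | cons d t ih =>
    intro s k
    rw [PySem.List.enumerate_cons]
    cases k with
    | zero =>
      simp only [List.filter_cons, Nat.cast_zero, add_zero,
        show ((some s : Option Int) == some s) = true by simp, Bool.not_true,
        Bool.false_eq_true, if_false]
      rw [pvFilter_out t (s + 1) s (by omega)]
      simp [pvKeep, pvKeep_none]
    | succ k' =>
      have hne : ((some s : Option Int) == some (s + ((k' + 1 : Nat) : Int))) = false := by
        simp; omega
      simp only [List.filter_cons, hne, Bool.not_false, if_true, List.map_cons]
      have hsh : s + ((k' + 1 : Nat) : Int) = (s + 1) + (k' : Int) := by push_cast; ring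
      rw [hsh, ih (s + 1) k']
      rfl

-- ===== VERDICT (by name: the statement is the Claim_ definition above) =====
theorem templateClassDef_spec : Claim_equal_templateClassDef := by
  intro cT cN aI _ _
  unfold Spec_templateClassDef templateClassDef templateClassDef_alt
  have hst : (if aI.length > 0 then pvLoopA aI false "" [] else (false, "", []))
      = pvLoopA aI false "" [] := by
    cases aI <;> simp [pvLoopA]
  rw [hst, pvLoopA_spec aI []]
  rw [pvFind_enum aI 0]
  rcases h : pvFind aI with _ | q
  · simp only [Option.map_none]
    rw [pvFilter_none aI 0, ← pvKeep_none aI]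
    simp
  · simp only [Option.map_some]
    have he : pvNm ((PySem.List.pyGet? aI ((0 : Int) + (q.1 : Int))).getD []) = pvNm q.2 := by
      have : PySem.List.pyGet? aI ((0 : Int) + (q.1 : Int)) = aI[q.1]? := by
        rw [show (0 : Int) + (q.1 : Int) = (q.1 : Int) by ring]
        exact PySem.List.pyGet?_natCast aI q.1
      rw [this, pvFind_get aI q.1 q.2 (by simpa using h)]
      rfl
    rw [he, pvFilter_some aI 0 q.1]
    simp
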